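-- pv_equiv track=rewrite | github.com/pypi-data/pypi-mirror-294 | packages/php-version-compare/php_version_compare-0.1.0.tar.gz/php_version_compare-0.1.0/src/php_version_compare/versioning.py | canonicalize_version
-- ===== SOURCE A (Python) =====
-- from typing import List
--
-- def canonicalize_version(version: str) -> str:
--     """
--     Canonicalize a version string into a "PHP-style" version string. This
--     function is used to normalize version strings before comparing them.
--
--     Examples:
--         >>> canonicalize_version("1.0")
--         '1.0'
--         >>> canonicalize_version("1.0-DEV")
--         '1.0.DEV'
--         >>> canonicalize_version("1.0.1alpha")
--         '1.0.1.alpha'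
--     """
--
--     canonicalized: List[str] = []
--     previous_char = None
--
--     for curr_char in version:
--         if curr_char in "-+_":
--             curr_char = "."
--         elif previous_char and (
--             (previous_char.isdigit() and curr_char.isalpha())
--             or (previous_char.isalpha() and curr_char.isdigit())
--         ):
--             canonicalized.append(".")
--
--         canonicalized.append(curr_char)
--         previous_char = curr_char
--
--     return "".join(canonicalized)
-- ===== SOURCE B (Python) =====
-- def canonicalize_version(version: str) -> str:
--     def cls(c):
--         return 0 if c.isdigit() else 1 if c.isalpha() else 2
--     t = ''.join('.' if c in '-+_' else c for c in version)
--     groups = []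
--     rest = t
--     while rest:
--         k = cls(rest[0])
--         i = 1
--         while i < len(rest) and cls(rest[i]) == k:
--             i += 1
--         groups.append((k, rest[:i]))
--         rest = rest[i:]
--     out = []
--     prev = None
--     for k, s in groups:
--         if prev is not None and prev + k == 1:
--             out.append('.')
--         out.append(s)
--         prev = k
--     return ''.join(out)
-- ===== Notes on version B (the rewrite author's own statement) =====
-- stated objective: alternative
-- what changed: Replaces A's single stateful previous-char pass by a staged algorithm: translate separators to dots, partition the string into maximal runs of one character class (digit, alpha, other), then join the runs inserting a dot exactly between adjacent digit and alpha runs.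
import Mathlib
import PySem

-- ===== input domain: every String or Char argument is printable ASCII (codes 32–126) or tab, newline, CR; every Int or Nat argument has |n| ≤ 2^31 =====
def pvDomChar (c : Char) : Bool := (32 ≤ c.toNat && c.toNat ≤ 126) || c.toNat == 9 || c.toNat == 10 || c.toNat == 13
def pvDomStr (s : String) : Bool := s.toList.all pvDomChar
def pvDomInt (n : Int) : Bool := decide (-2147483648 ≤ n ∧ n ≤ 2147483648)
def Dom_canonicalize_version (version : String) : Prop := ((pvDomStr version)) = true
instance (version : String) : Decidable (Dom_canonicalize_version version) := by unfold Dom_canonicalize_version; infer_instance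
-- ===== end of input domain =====

-- B trades A's stateful previous-char loop for a staged run-grouping algorithm
-- (translate, partition into class runs, join runs); objective: alternative, same O(n).

-- ===== PORT A =====
-- exact on the ASCII domain: Python str.isdigit/str.isalpha coincide with
-- Char.isDigit/Char.isAlpha on ASCII characters
def pvBoundOpt (p : Option Char) (c : Char) : Bool :=
  match p with
  | none => false
  | some p => (p.isDigit && c.isAlpha) || (p.isAlpha && c.isDigit)

-- the loop: state = (output emitted so far, previous_char); written as the
-- structural recursion emitting the same characters in order
def canonVA : List Char → Option Char → List Char
  | [], _ => []
  | c :: rest, prev =>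
      if c = '-' || c = '+' || c = '_' then
        '.' :: canonVA rest (some '.')
      else
        (if pvBoundOpt prev c then ['.'] else []) ++ c :: canonVA rest (some c)

def canonicalize_version (version : String) : String :=
  String.mk (canonVA version.toList none)

-- ===== PORT B =====
def pvCls (c : Char) : Nat := if c.isDigit then 0 else if c.isAlpha then 1 else 2

def pvTr (c : Char) : Char := if c = '-' || c = '+' || c = '_' then '.' else c

-- the outer while loop: peel off the maximal run of the first char's class
def pvGroups : List Char → List (Nat × List Char)
  | [] => []
  | c :: rest =>
      (pvCls c, c :: rest.takeWhile (fun d => pvCls d = pvCls c)) ::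
        pvGroups (rest.dropWhile (fun d => pvCls d = pvCls c))
termination_by t => t.length
decreasing_by
  simp only [List.length_cons]
  exact Nat.lt_succ_of_le (List.length_dropWhile_le _ _)

-- the join loop: prev = class of the previous run (None before the first)
def pvJoin : Option Nat → List (Nat × List Char) → List Char
  | _, [] => []
  | prev, (k, s) :: gs =>
      (match prev with
       | some p => if p + k = 1 then ['.'] else []
       | none => []) ++ s ++ pvJoin (some k) gs

def canonicalize_version_alt (version : String) : String :=
  String.mk (pvJoin none (pvGroups (version.toList.map pvTr)))

-- ===== PRECONDITION & SPEC =====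
def Spec_canonicalize_version (version : String) (out : String) : Prop := out = canonicalize_version_alt version
instance (version : String) (out : String) : Decidable (Spec_canonicalize_version version out) := by unfold Spec_canonicalize_version; infer_instance

-- ===== CLAIM (what is proved, stated in full; the proofs are below) =====
def Claim_equal_canonicalize_version : Prop := ∀ (version : String), Dom_canonicalize_version version → Spec_canonicalize_version version (canonicalize_version version)

-- ===== LEMMAS AND PROOFS =====

-- proof-side bridge: the pairwise boundary-dot scan over the translated list
def pvBound (a b : Char) : Bool := (a.isDigit && b.isAlpha) || (a.isAlpha && b.isDigit)

def bridge : List Char → List Char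
  | [] => []
  | [a] => [a]
  | a :: b :: rest => a :: ((if pvBound a b then ['.'] else []) ++ bridge (b :: rest))

-- step 1: A's stateful loop equals the bridge over the translated list
theorem bridge_cons (cs : List Char) (p : Char) :
    bridge (p :: cs.map pvTr) = p :: canonVA cs (some p) := by
  induction cs generalizing p with
  | nil => simp [bridge, canonVA]
  | cons c rest ih =>
      by_cases hsep : c = '-' || c = '+' || c = '_'
      · have htr : pvTr c = '.' := by simp [pvTr, hsep]
        simp [bridge, canonVA, htr, hsep, ih, pvBound, Char.isDigit, Char.isAlpha,
          Char.isUpper, Char.isLower]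
      · have htr : pvTr c = c := by simp [pvTr, hsep]
        simp only [List.map_cons, bridge, canonVA, htr, ih, hsep, if_false,
          Bool.false_eq_true, pvBound, pvBoundOpt]
        rfl

theorem canonVA_eq_bridge (cs : List Char) : canonVA cs none = bridge (cs.map pvTr) := by
  cases cs with
  | nil => simp [canonVA, bridge]
  | cons c rest =>
      by_cases hsep : c = '-' || c = '+' || c = '_'
      · have htr : pvTr c = '.' := by simp [pvTr, hsep]
        simp [canonVA, hsep, htr, bridge_cons]
      · have htr : pvTr c = c := by simp [pvTr, hsep]
        simp [canonVA, hsep, htr, bridge_cons, pvBoundOpt]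

-- str.isdigit and str.isalpha are disjoint on characters
theorem digit_not_alpha (a : Char) (h : a.isDigit = true) : a.isAlpha = false := by
  simp [Char.isDigit, Char.isAlpha, Char.isUpper, Char.isLower, UInt32.le_iff_toNat_le] at *
  omega

-- the boundary test of the bridge is exactly the class-sum test of the join
theorem pvBound_cls (a b : Char) : pvBound a b = decide (pvCls a + pvCls b = 1) := by
  unfold pvBound pvCls
  by_cases h1 : a.isDigit = true <;> by_cases h3 : b.isDigit = true <;>
    simp_all [digit_not_alpha] <;>
    (try by_cases h2 : a.isAlpha = true) <;> (try by_cases h4 : b.isAlpha = true) <;> simp_all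

-- step 2a: the bridge walks through a uniform-class run without inserting dots
theorem bridge_run (run : List Char) (c : Char) (rest : List Char)
    (h : ∀ d ∈ run, pvCls d = pvCls c) :
    bridge (c :: run ++ rest)
      = c :: run ++ (match rest with
        | [] => []
        | r :: _ => (if pvCls c + pvCls r = 1 then ['.'] else []) ++ bridge rest) := by
  induction run generalizing c with
  | nil =>
      cases rest with
      | nil => simp [bridge]
      | cons r rs => simp [bridge, pvBound_cls]
  | cons d run' ih =>
      have hd : pvCls d = pvCls c := h d (by simp)
      have hnb : pvBound c d = false := by
        rw [pvBound_cls, hd]; simp; omega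
      have hrec := ih d (fun e he => (h e (by simp [he])).trans hd.symm)
      simp only [List.cons_append] at hrec ⊢
      show bridge (c :: d :: (run' ++ rest)) = _
      simp only [bridge, hnb, Bool.false_eq_true, if_false, List.nil_append]
      rw [hrec, hd]

theorem pvJoin_some (k : Nat) (t : List Char) :
    pvJoin (some k) (pvGroups t)
      = (match t with
         | [] => []
         | r :: _ => (if k + pvCls r = 1 then ['.'] else []) ++ pvJoin none (pvGroups t)) := by
  cases t with
  | nil => simp [pvGroups, pvJoin]
  | cons r rs => simp [pvGroups, pvJoin]

-- one peeled run: the bridge over c :: (take ++ drop) equals run-then-join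
theorem bridge_step (c : Char) (take drop : List Char)
    (hmem : ∀ d ∈ take, pvCls d = pvCls c)
    (hih : bridge drop = pvJoin none (pvGroups drop)) :
    bridge (c :: (take ++ drop)) = (c :: take) ++ pvJoin (some (pvCls c)) (pvGroups drop) := by
  have hb := bridge_run take c drop hmem
  simp only [List.cons_append] at hb ⊢
  rw [hb, pvJoin_some]
  cases drop with
  | nil => simp
  | cons r rs => simp [hih]

-- step 2b: the bridge equals the grouped join
theorem bridge_eq_join (n : Nat) : ∀ t : List Char, t.length ≤ n →
    bridge t = pvJoin none (pvGroups t) := by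
  induction n with
  | zero =>
      intro t ht
      have : t = [] := List.length_eq_zero_iff.mp (Nat.le_zero.mp ht)
      simp [this, bridge, pvGroups, pvJoin]
  | succ n ih =>
      intro t ht
      cases t with
      | nil => simp [bridge, pvGroups, pvJoin]
      | cons c rest =>
          have hmem : ∀ d ∈ rest.takeWhile (fun d => pvCls d = pvCls c), pvCls d = pvCls c := by
            intro d hdm
            simpa using List.mem_takeWhile_imp hdm
          have hlen : (rest.dropWhile (fun d => pvCls d = pvCls c)).length ≤ n := by
            have h1 := List.length_dropWhile_le (fun d => decide (pvCls d = pvCls c)) rest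
            simp only [List.length_cons] at ht
            omega
          have hstep := bridge_step c (rest.takeWhile (fun d => pvCls d = pvCls c))
            (rest.dropWhile (fun d => pvCls d = pvCls c)) hmem (ih _ hlen)
          rw [List.takeWhile_append_dropWhile] at hstep
          rw [hstep]
          simp [pvGroups, pvJoin]

-- ===== VERDICT (by name: the statement is the Claim_ definition above) =====
theorem canonicalize_version_spec : Claim_equal_canonicalize_version := by
  intro version _
  unfold Spec_canonicalize_version canonicalize_version canonicalize_version_alt
  rw [canonVA_eq_bridge, bridge_eq_join (version.toList.map pvTr).length _ le_rfl]
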